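-- pv_equiv track=rewrite | github.com/bmad-sim/bmad-ecosystem | util_programs/elegant_to_bmad/elegant_to_bmad.py | parameter_dictionary
-- ===== SOURCE A (Python) =====
-- from collections import OrderedDict
--
-- def parameter_dictionary(word_lst):
--
--   orig_word_lst = word_lst
--
--   # replace "0." or "0.0" with "0"
--   word_lst = ['0' if x == '0.0' or x == '0.' else x for x in word_lst]
--
--   pdict = OrderedDict()
--   while True:
--     if len(word_lst) == 0: return pdict
--
--     if word_lst[1] != '=':
--       print ('PROBLEM PARSING PARAMETER LIST: ' + ''.join(orig_word_lst))
--       return pdict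
--
--     if '=' in word_lst[2:]:
--       ix = word_lst.index('=', 2)
--       if word_lst[0] == 'eyaw':
--         pdict['yaw'] = ''.join(word_lst[2:ix-2])
--       if word_lst[0] == 'epitch':
--         pdict['pitch'] = ''.join(word_lst[2:ix-2])
--       else:
--         pdict[word_lst[0]] = ''.join(word_lst[2:ix-2])
--       word_lst = word_lst[ix-1:]
--
--     else:
--       pdict[word_lst[0]] = ''.join(word_lst[2:])
--       return pdict
-- ===== SOURCE B (Python) =====
-- from collections import OrderedDict
--
-- def parameter_dictionary(word_lst):
--   # Single forward pass with an integer cursor (no list re-slicing per parameter).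
--   words = ['0' if x == '0.0' or x == '0.' else x for x in word_lst]
--   pdict = OrderedDict()
--   n = len(words)
--   i = 0
--   while i + 1 < n and words[i + 1] == '=':
--     try:
--       j = words.index('=', i + 2)
--     except ValueError:
--       j = -1
--     key = words[i]
--     if key == 'eyaw':
--       key = 'yaw'
--     elif key == 'epitch':
--       key = 'pitch'
--     if j >= 0:
--       pdict[key] = ''.join(words[i + 2:j - 2])
--       i = j - 1
--     else:
--       pdict[key] = ''.join(words[i + 2:])
--       break
--   return pdict
-- ===== Notes on version B (the rewrite author's own statement) =====
-- stated objective: alternative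
-- what changed: B replaces A's while-loop that re-slices the remaining token list each iteration (word_lst[2:], index, word_lst[ix-1:] copies) with a single forward pass over the original list using an integer cursor, and fixes A's eyaw/epitch rename slips (if instead of elif, and no rename on the last parameter) by renaming the key uniformly before the single insert.
-- intended difference: On well-formed token lists (word_lst[1]=='=') in which 'eyaw' occurs as a parameter name or 'epitch' is the last parameter name, A's missing elif inserts both 'yaw' and 'eyaw' and its final branch forgets the rename entirely, while B performs the evidently intended rename uniformly and inserts only 'yaw'/'pitch'. — e.g. on parameter_dictionary(["eyaw", "=", "1", ",", "x", "=", "2"]): A returns [("yaw", "1"), ("eyaw", "1"), ("x", "2")], B returns [("yaw", "1"), ("x", "2")]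
import Mathlib
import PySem

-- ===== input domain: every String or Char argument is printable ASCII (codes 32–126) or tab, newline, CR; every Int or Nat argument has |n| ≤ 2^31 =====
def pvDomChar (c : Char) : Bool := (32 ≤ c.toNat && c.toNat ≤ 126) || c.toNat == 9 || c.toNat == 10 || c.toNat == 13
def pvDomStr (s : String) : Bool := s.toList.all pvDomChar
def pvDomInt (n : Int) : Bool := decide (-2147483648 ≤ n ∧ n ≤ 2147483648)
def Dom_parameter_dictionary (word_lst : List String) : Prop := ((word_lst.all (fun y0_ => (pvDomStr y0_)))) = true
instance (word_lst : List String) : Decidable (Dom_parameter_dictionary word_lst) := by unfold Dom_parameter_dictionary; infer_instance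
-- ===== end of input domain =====

-- B replaces A's re-slicing loop by one integer-cursor pass over the token list and renames
-- eyaw/epitch keys uniformly (A's if-instead-of-elif and its unrenamed last key are stated as the
-- intended difference D_); A's diagnostic print on a malformed list is a side effect not reproduced.


-- ===== PORT A =====
-- ['0' if x == '0.0' or x == '0.' else x for x in word_lst]  (identical comprehension in A and B)
def pdNormTok (x : String) : String := if x = "0.0" ∨ x = "0." then "0" else x

def pdNorm (word_lst : List String) : List String := word_lst.map pdNormTok

-- A's while-loop; w is the current (re-sliced) word_lst, pdict the OrderedDict.  The fuel
-- argument only makes the recursion structural: each iteration shortens w, so fuel = w.length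
-- at the call site is never exhausted.  word_lst.index('=', 2) is exactly
-- 2 + (first index of '=' in word_lst[2:]) when '=' ∈ word_lst[2:].
def pdLoopA (fuel : Nat) (w : List String) (pdict : PySem.Dict String String) :
    PySem.Dict String String :=
  match fuel with
  | 0 => pdict
  | fuel + 1 =>
    match w with
    | [] => pdict
    | [_] => pdict    -- Python raises IndexError on word_lst[1] here; excluded by Pre_, value unused
    | k :: e :: rest =>
      if e ≠ "=" then pdict   -- 'PROBLEM PARSING' branch (its print is a side effect, not ported)
      else
        match PySem.List.index? rest "=" with
        | some j =>   -- ix = j + 2; word_lst[2:ix-2] = rest.take (j - 2); word_lst[ix-1:] = (e :: rest).drop j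
          let v := PySem.Str.join "" (rest.take (j - 2))
          let pd1 := if k = "eyaw" then pdict.insert "yaw" v else pdict
          let pd2 := if k = "epitch" then pd1.insert "pitch" v else pd1.insert k v
          pdLoopA fuel ((e :: rest).drop j) pd2
        | none => pdict.insert k (PySem.Str.join "" rest)

def parameter_dictionary (word_lst : List String) : List (String × String) :=
  (pdLoopA (pdNorm word_lst).length (pdNorm word_lst) PySem.Dict.empty).items

-- ===== PORT B =====
-- B's while-loop: i is the integer cursor into the (fixed) normalized list words; fuel as above
-- (the cursor strictly advances, so fuel = words.length is never exhausted).
def pdLoopB (fuel : Nat) (words : List String) (i : Nat) (pdict : PySem.Dict String String) :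
    PySem.Dict String String :=
  match fuel with
  | 0 => pdict
  | fuel + 1 =>
    if words[i+1]? = some "=" then      -- i + 1 < n and words[i + 1] == '='
      let key0 := words.getD i ""       -- words[i], in range because i + 1 < n
      let key := if key0 = "eyaw" then "yaw" else if key0 = "epitch" then "pitch" else key0
      match PySem.List.index? (words.drop (i + 2)) "=" with  -- words.index('=', i+2): found at i+2+dj; ValueError = none
      | some dj =>
        let j := i + 2 + dj
        pdLoopB fuel words (j - 1)
          (pdict.insert key (PySem.Str.join "" (PySem.List.slice words (some ((i : Int) + 2)) (some ((j : Int) - 2)))))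
      | none =>
        pdict.insert key (PySem.Str.join "" (PySem.List.slice words (some ((i : Int) + 2)) none))
    else pdict

def parameter_dictionary_alt (word_lst : List String) : List (String × String) :=
  (pdLoopB (pdNorm word_lst).length (pdNorm word_lst) 0 PySem.Dict.empty).items

-- ===== PRECONDITION & SPEC =====
-- Pre_ excludes exactly the one-element lists, on which A raises IndexError (word_lst[1]).
def Pre_parameter_dictionary (word_lst : List String) : Prop := word_lst.length ≠ 1
instance (word_lst : List String) : Decidable (Pre_parameter_dictionary word_lst) := by
  unfold Pre_parameter_dictionary; infer_instance

def pvWitness_parameter_dictionary : List String := ["x", "=", "1"]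

-- The parameter-name tokens of the list: word_lst[0] plus the token standing immediately before
-- each '=' at index ≥ 2 (read off positionally from the consecutive pairs of word_lst[1:]).
def pdKs (w : List String) : List String :=
  w.getD 0 "" :: ((w.drop 1).zip (w.drop 2)).filterMap
    (fun p => if p.2 = "=" then some p.1 else none)

-- On token lists whose parse has 'eyaw' as a parameter name (A's missing elif inserts both 'yaw'
-- and 'eyaw'; A's final branch forgets the rename) or 'epitch' as the last parameter name (same
-- forgotten rename), B performs the intended rename uniformly and inserts only 'yaw'/'pitch'.
def D_parameter_dictionary (word_lst : List String) : Prop :=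
  2 ≤ word_lst.length ∧ word_lst.getD 1 "" = "=" ∧
    ("eyaw" ∈ pdKs word_lst ∨ (pdKs word_lst).getLast? = some "epitch")
instance (word_lst : List String) : Decidable (D_parameter_dictionary word_lst) := by
  unfold D_parameter_dictionary; infer_instance

def Spec_parameter_dictionary (word_lst : List String) (out : List (String × String)) : Prop :=
  ¬ D_parameter_dictionary word_lst → out = parameter_dictionary_alt word_lst
instance (word_lst : List String) (out : List (String × String)) : Decidable (Spec_parameter_dictionary word_lst out) := by
  unfold Spec_parameter_dictionary; infer_instance

def pvDiffWitness_parameter_dictionary : List String := ["eyaw", "=", "1", ",", "x", "=", "2"]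
def pvDiffWitnessOut_parameter_dictionary : (List (String × String)) × (List (String × String)) :=
  ([("yaw", "1"), ("eyaw", "1"), ("x", "2")], [("yaw", "1"), ("x", "2")])

-- ===== CLAIM (what is proved, stated in full; the proofs are below) =====
def Claim_unchanged_parameter_dictionary : Prop := ∀ (word_lst : List String), Dom_parameter_dictionary word_lst → Pre_parameter_dictionary word_lst → Spec_parameter_dictionary word_lst (parameter_dictionary word_lst)
def Claim_changed_parameter_dictionary : Prop := Dom_parameter_dictionary (pvDiffWitness_parameter_dictionary) ∧ Pre_parameter_dictionary (pvDiffWitness_parameter_dictionary) ∧ D_parameter_dictionary (pvDiffWitness_parameter_dictionary) ∧ parameter_dictionary (pvDiffWitness_parameter_dictionary) = pvDiffWitnessOut_parameter_dictionary.1 ∧ parameter_dictionary_alt (pvDiffWitness_parameter_dictionary) = pvDiffWitnessOut_parameter_dictionary.2 ∧ pvDiffWitnessOut_parameter_dictionary.1 ≠ pvDiffWitnessOut_parameter_dictionary.2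

def Claim_exact_parameter_dictionary : Prop := ∀ (word_lst : List String), Dom_parameter_dictionary word_lst → Pre_parameter_dictionary word_lst → D_parameter_dictionary word_lst → parameter_dictionary word_lst ≠ parameter_dictionary_alt word_lst

-- ===== LEMMAS AND PROOFS =====

-- Proof-internal positional helpers: positions of '=' within a list, and the key list restated
-- through them (proved equal to pdKs below); pdKeyBad mirrors A's recursion for the induction.
def pdEqIdxs : List String → List Nat
  | [] => []
  | t :: ts => if t = "=" then 0 :: (pdEqIdxs ts).map (· + 1) else (pdEqIdxs ts).map (· + 1)

def pdKeys (w : List String) : List String :=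
  w.getD 0 "" :: (pdEqIdxs (w.drop 2)).map (fun q => w.getD (q + 1) "")

def pdKeyBad (fuel : Nat) (w : List String) : Bool :=
  match fuel with
  | 0 => false
  | fuel + 1 =>
    match w with
    | [] => false
    | [_] => false
    | k :: e :: rest =>
      if e ≠ "=" then false
      else
        match PySem.List.index? rest "=" with
        | some j => k == "eyaw" || pdKeyBad fuel ((e :: rest).drop j)
        | none => k == "eyaw" || k == "epitch"

lemma pdZip_eq (u : List String) :
    (u.zip (u.drop 1)).filterMap (fun p => if p.2 = "=" then some p.1 else none)
      = (pdEqIdxs (u.drop 1)).map (fun q => u.getD q "") := by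
  induction u with
  | nil => rfl
  | cons a t ih =>
    cases t with
    | nil => rfl
    | cons b t' =>
      have hmm : ∀ l : List Nat, (l.map (· + 1)).map (fun q => (a :: b :: t').getD q "")
          = l.map (fun q => (b :: t').getD q "") := by
        intro l
        rw [List.map_map]
        apply List.map_congr_left
        intro q _
        rfl
      have hstep : ((a :: b :: t').zip ((a :: b :: t').drop 1)).filterMap
            (fun p => if p.2 = "=" then some p.1 else none)
          = (if b = "=" then [a] else []) ++ ((b :: t').zip ((b :: t').drop 1)).filterMap
            (fun p => if p.2 = "=" then some p.1 else none) := by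
        by_cases hb : b = "="
        · simp [hb]
        · simp [hb]
      rw [hstep, ih]
      by_cases hb : b = "="
      · subst hb
        rw [if_pos rfl]
        simp only [List.drop_succ_cons, List.drop_zero, List.singleton_append]
        rw [show pdEqIdxs ("=" :: t') = 0 :: (pdEqIdxs t').map (· + 1) from by simp [pdEqIdxs],
          List.map_cons, hmm]
        rfl
      · rw [if_neg hb]
        simp only [List.drop_succ_cons, List.drop_zero, List.nil_append]
        rw [show pdEqIdxs (b :: t') = (pdEqIdxs t').map (· + 1) from by simp [pdEqIdxs, hb], hmm]

lemma pdKs_eq (w : List String) : pdKs w = pdKeys w := by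
  unfold pdKs pdKeys
  refine List.cons_eq_cons.mpr ⟨rfl, ?_⟩
  have h2 : w.drop 2 = (w.drop 1).drop 1 := by rw [List.drop_drop]
  rw [h2, pdZip_eq (w.drop 1)]
  apply List.map_congr_left
  intro q _
  rw [List.getD_eq_getElem?_getD, List.getD_eq_getElem?_getD, List.getElem?_drop]
  congr 2
  omega

lemma mem_cons_iff_dropLast_or_getLast (a y : String) (ys : List String) :
    a ∈ y :: ys ↔ (a ∈ (y :: ys).dropLast ∨ (y :: ys).getLast? = some a) := by
  induction ys generalizing y with
  | nil => simp [eq_comm]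
  | cons b ys ih =>
    simp only [List.mem_cons, List.dropLast_cons₂, List.getLast?_cons_cons] at ih ⊢
    rw [ih b]
    exact or_assoc.symm

lemma pdEqIdxs_of_index?_none (l : List String) (h : PySem.List.index? l "=" = none) :
    pdEqIdxs l = [] := by
  induction l with
  | nil => rfl
  | cons t ts ih =>
    by_cases ht : t = "="
    · subst ht
      rw [PySem.List.index?_cons_self] at h
      simp at h
    · rw [PySem.List.index?_cons_of_ne _ ht] at h
      have h2 : PySem.List.index? ts "=" = none := by
        cases hi : PySem.List.index? ts "=" with
        | none => rfl
        | some m => rw [hi] at h; simp at h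
      simp [pdEqIdxs, ht, ih h2]

lemma pdEqIdxs_of_index?_some (l : List String) (j : Nat) (h : PySem.List.index? l "=" = some j) :
    pdEqIdxs l = j :: (pdEqIdxs (l.drop (j+1))).map (· + (j+1)) := by
  induction l generalizing j with
  | nil =>
    rw [PySem.List.index?_eq_idxOf?] at h
    simp at h
  | cons t ts ih =>
    by_cases ht : t = "="
    · subst ht
      rw [PySem.List.index?_cons_self] at h
      obtain rfl : (0 : Nat) = j := Option.some_inj.mp h
      simp [pdEqIdxs]
    · rw [PySem.List.index?_cons_of_ne _ ht] at h
      cases hi : PySem.List.index? ts "=" with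
      | none => rw [hi] at h; simp at h
      | some m =>
        rw [hi] at h
        simp only [Option.map_some, Option.some_inj] at h
        subst h
        rw [show pdEqIdxs (t :: ts) = (pdEqIdxs ts).map (· + 1) from by simp [pdEqIdxs, ht],
          ih m hi]
        simp only [List.map_cons, List.map_map, List.drop_succ_cons]
        refine List.cons_eq_cons.mpr ⟨rfl, ?_⟩
        apply List.map_congr_left
        intro q _
        show (q + (m + 1)) + 1 = q + (m + 1 + 1)
        omega

lemma pdKeys_final (k : String) (rest : List String)
    (h : PySem.List.index? rest "=" = none) :
    pdKeys (k :: "=" :: rest) = [k] := by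
  unfold pdKeys
  simp [pdEqIdxs_of_index?_none rest h]

lemma pdKeys_cons (k : String) (rest : List String) (j : Nat)
    (h : PySem.List.index? rest "=" = some j) :
    pdKeys (k :: "=" :: rest) = k :: pdKeys (("=" :: rest).drop j) := by
  have hget : ∀ m : Nat, (("=" :: rest).drop j).getD m "" = (k :: "=" :: rest).getD (j + 1 + m) "" := by
    intro m
    rw [show ("=" :: rest).drop j = (k :: "=" :: rest).drop (j+1) from (List.drop_succ_cons ..).symm,
      List.getD_eq_getElem?_getD, List.getD_eq_getElem?_getD, List.getElem?_drop]
  have hdrop2 : (("=" :: rest).drop j).drop 2 = rest.drop (j+1) := by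
    rw [List.drop_drop]
    exact List.drop_succ_cons ..
  unfold pdKeys
  rw [hdrop2, show (k :: "=" :: rest).drop 2 = rest from rfl,
    pdEqIdxs_of_index?_some rest j h]
  simp only [List.map_cons, List.map_map, List.getD_cons_zero]
  refine List.cons_eq_cons.mpr ⟨rfl, List.cons_eq_cons.mpr ⟨?_, ?_⟩⟩
  · exact (hget 0).symm
  · apply List.map_congr_left
    intro q _
    show (k :: "=" :: rest).getD (q + (j+1) + 1) "" = (("=" :: rest).drop j).getD (q+1) ""
    rw [show q + (j+1) + 1 = j + 1 + (q+1) from by omega]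
    exact (hget (q+1)).symm

lemma pdKeyBad_sound (fuel : Nat) (v : List String) (h : pdKeyBad fuel v = true) :
    2 ≤ v.length ∧ v.getD 1 "" = "=" ∧
      ("eyaw" ∈ (pdKeys v).dropLast ∨
        (pdKeys v).getLast? = some "eyaw" ∨ (pdKeys v).getLast? = some "epitch") := by
  induction fuel generalizing v with
  | zero => simp [pdKeyBad] at h
  | succ fuel ih =>
    match v with
    | [] => simp [pdKeyBad] at h
    | [x] => simp [pdKeyBad] at h
    | k :: e :: rest =>
      by_cases he : e = "="
      · subst he
        refine ⟨by simp only [List.length_cons]; omega, by simp, ?_⟩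
        cases hidx : PySem.List.index? rest "=" with
        | none =>
          have h2 : k = "eyaw" ∨ k = "epitch" := by
            simp only [pdKeyBad, hidx] at h
            simpa using h
          rw [pdKeys_final k rest hidx]
          rcases h2 with hk | hk
          · exact Or.inr (Or.inl (by simp [hk]))
          · exact Or.inr (Or.inr (by simp [hk]))
        | some j =>
          have h2 : k = "eyaw" ∨ pdKeyBad fuel (("=" :: rest).drop j) = true := by
            simp only [pdKeyBad, hidx] at h
            simpa using h
          rw [pdKeys_cons k rest j hidx]
          obtain ⟨y, ys, hsh⟩ : ∃ y ys, pdKeys (("=" :: rest).drop j) = y :: ys := ⟨_, _, rfl⟩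
          rcases h2 with hk | hrec
          · left
            rw [hsh, List.dropLast_cons₂, hk]
            simp
          · obtain ⟨-, -, hbad⟩ := ih _ hrec
            rw [hsh] at hbad ⊢
            rcases hbad with hm | hl | hl
            · exact Or.inl (by rw [List.dropLast_cons₂]; exact List.mem_cons_of_mem _ hm)
            · exact Or.inr (Or.inl (by rw [List.getLast?_cons_cons]; exact hl))
            · exact Or.inr (Or.inr (by rw [List.getLast?_cons_cons]; exact hl))
      · exfalso
        simp [pdKeyBad, he] at h

lemma pdNormTok_eq_iff (x y : String) (hy0 : y ≠ "0") (hy1 : y ≠ "0.0") (hy2 : y ≠ "0.") :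
    (pdNormTok x = y) ↔ (x = y) := by
  unfold pdNormTok
  split_ifs with h
  · constructor <;> intro hx
    · exact absurd hx.symm hy0
    · rcases h with h | h
      · exact absurd (h ▸ hx).symm hy1
      · exact absurd (h ▸ hx).symm hy2
  · exact Iff.rfl

lemma index?_norm (l : List String) :
    PySem.List.index? (pdNorm l) "=" = PySem.List.index? l "=" := by
  induction l with
  | nil => rfl
  | cons x t ih =>
    show PySem.List.index? (pdNormTok x :: pdNorm t) "=" = PySem.List.index? (x :: t) "="
    by_cases hx : x = "="
    · have hnx : pdNormTok x = "=" := (pdNormTok_eq_iff x "=" (by decide) (by decide) (by decide)).mpr hx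
      rw [← hnx, PySem.List.index?_cons_self, hnx, hx, PySem.List.index?_cons_self]
    · have hnx : pdNormTok x ≠ "=" := fun h => hx ((pdNormTok_eq_iff x "=" (by decide) (by decide) (by decide)).mp h)
      rw [PySem.List.index?_cons_of_ne _ hnx, PySem.List.index?_cons_of_ne _ hx, ih]

lemma pdKeyBad_norm (fuel : Nat) (w : List String) :
    pdKeyBad fuel (pdNorm w) = pdKeyBad fuel w := by
  induction fuel generalizing w with
  | zero => rfl
  | succ fuel ih =>
    match w with
    | [] => rfl
    | [x] => rfl
    | k :: e :: rest =>
      show pdKeyBad (fuel+1) (pdNormTok k :: pdNormTok e :: pdNorm rest) = _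
      have hkeyaw : (pdNormTok k == "eyaw") = (k == "eyaw") := by
        by_cases hk : k = "eyaw"
        · subst hk; simp [pdNormTok]
        · have h2 : pdNormTok k ≠ "eyaw" := fun h => hk ((pdNormTok_eq_iff k "eyaw" (by decide) (by decide) (by decide)).mp h)
          simp [hk, h2]
      have hkep : (pdNormTok k == "epitch") = (k == "epitch") := by
        by_cases hk : k = "epitch"
        · subst hk; simp [pdNormTok]
        · have h2 : pdNormTok k ≠ "epitch" := fun h => hk ((pdNormTok_eq_iff k "epitch" (by decide) (by decide) (by decide)).mp h)
          simp [hk, h2]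
      by_cases he : e = "="
      · subst he
        have hne : pdNormTok "=" = "=" := by decide
        simp only [pdKeyBad, hne, index?_norm]
        cases hidx : PySem.List.index? rest "=" with
        | none => simp [hkeyaw, hkep]
        | some j =>
          have h2 : ("=" : String) :: pdNorm rest = pdNorm ("=" :: rest) := by
            show _ = pdNormTok "=" :: pdNorm rest
            rw [hne]
          simp only [hkeyaw]
          rw [h2, show pdNorm ("=" :: rest) = List.map pdNormTok ("=" :: rest) from rfl,
            ← List.map_drop,
            show List.map pdNormTok (List.drop j ("=" :: rest)) = pdNorm (List.drop j ("=" :: rest)) from rfl,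
            ih]
      · have hne : pdNormTok e ≠ "=" := fun h => he ((pdNormTok_eq_iff e "=" (by decide) (by decide) (by decide)).mp h)
        simp [pdKeyBad, he, hne]

lemma loop_eq (fuel : Nat) (words : List String) (i : Nat) (pdict : PySem.Dict String String)
    (hb : pdKeyBad fuel (words.drop i) = false) (h1 : (words.drop i).length ≠ 1) :
    pdLoopA fuel (words.drop i) pdict = pdLoopB fuel words i pdict := by
  induction fuel generalizing i pdict with
  | zero => rfl
  | succ fuel ih =>
    cases hdrop : words.drop i with
    | nil =>
      have hlen : words.length ≤ i := List.drop_eq_nil_iff.mp hdrop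
      have hc : words[i+1]? = none := List.getElem?_eq_none (by omega)
      simp [pdLoopA, pdLoopB, hc]
    | cons k t =>
      cases t with
      | nil => rw [hdrop] at h1; simp at h1
      | cons e rest =>
        have hW1 : words[i+1]? = some e := by
          have h := (List.getElem?_drop (xs := words) (i := i) (j := 1))
          rw [hdrop] at h
          simpa using h.symm
        have hW0 : words[i]? = some k := by
          have h := (List.getElem?_drop (xs := words) (i := i) (j := 0))
          rw [hdrop] at h
          simpa using h.symm
        have hrest : words.drop (i+2) = rest := by
          have h := (List.drop_drop (i := 2) (j := i) (l := words))
          rw [hdrop] at h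
          simpa using h.symm
        rw [hdrop] at hb
        by_cases he : e = "="
        · subst he
          have hkey : words.getD i "" = k := by rw [List.getD_eq_getElem?_getD, hW0]; rfl
          have hdrop1 : words.drop (i+1) = "=" :: rest := by
            have h := (List.drop_drop (i := 1) (j := i) (l := words))
            rw [hdrop] at h
            simpa using h.symm
          cases hidx : PySem.List.index? rest "=" with
          | none =>
            have hbd : ¬ k = "eyaw" ∧ ¬ k = "epitch" := by
              have h := hb
              simp only [pdKeyBad, hidx] at h
              simpa using h
            have hcast1 : ((i : Int) + 2) = ((i + 2 : Nat) : Int) := by push_cast; ring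
            simp only [pdLoopA, pdLoopB, hW1, hkey, hrest, hidx, reduceIte]
            rw [hcast1, PySem.List.slice_from_natCast, hrest]
            simp [hbd.1, hbd.2]
          | some j =>
            have hbd : (k == "eyaw") = false ∧ pdKeyBad fuel (("=" :: rest).drop j) = false := by
              have h := hb
              simp only [pdKeyBad, hidx] at h
              simpa using h
            have hk1 : ¬ k = "eyaw" := by simpa using hbd.1
            obtain ⟨hjlt, -, -⟩ := PySem.List.getElem_of_index?_eq_some hidx
            have hdrop' : words.drop (i+1+j) = ("=" :: rest).drop j := by
              have h := (List.drop_drop (i := j) (j := i+1) (l := words))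
              rw [hdrop1] at h
              exact h.symm
            have h1' : (words.drop (i+1+j)).length ≠ 1 := by
              rw [hdrop']
              simp only [List.length_drop, List.length_cons]
              omega
            have hb' : pdKeyBad fuel (words.drop (i+1+j)) = false := by
              rw [hdrop']; exact hbd.2
            have hcast1 : ((i : Int) + 2) = ((i + 2 : Nat) : Int) := by push_cast; ring
            have hval : PySem.List.slice words (some ((i : Int) + 2)) (some (((i + 2 + j : Nat) : Int) - 2))
                = rest.take (j - 2) := by
              have hcast2 : (((i + 2 + j : Nat) : Int) - 2) = ((i + j : Nat) : Int) := by push_cast; ring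
              rw [hcast1, hcast2, PySem.List.slice_natCast, hrest,
                show (i + j) - (i + 2) = j - 2 from by omega]
            simp only [pdLoopA, pdLoopB, hW1, hkey, hrest, hidx, reduceIte]
            rw [hval, if_neg hk1,
              show i + 2 + j - 1 = i + 1 + j from by omega, ← hdrop']
            rw [if_neg (show ¬ ("=" : String) ≠ "=" from by simp), if_neg hk1]
            by_cases hk2 : k = "epitch"
            · subst hk2
              rw [if_pos rfl, if_pos rfl]
              exact ih (i+1+j) _ hb' h1'
            · rw [if_neg hk2, if_neg hk2]
              exact ih (i+1+j) _ hb' h1'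
        · have hc : ¬ (words[i+1]? = some "=") := by
            rw [hW1]
            simp [he]
          simp [pdLoopA, pdLoopB, he, hc]


-- Tightness: inside D_ the two dictionaries really differ — A's result contains the raw key
-- "eyaw" or "epitch" while B never inserts either.
lemma get?_insert_ne_none (d : PySem.Dict String String) (k b v : String)
    (h : d.get? b ≠ none) : (d.insert k v).get? b ≠ none := by
  by_cases hb : b = k
  · subst hb
    rw [PySem.Dict.get?_insert_self]
    simp
  · rw [PySem.Dict.get?_insert_of_ne _ _ hb]
    exact h

lemma pdLoopA_pres (fuel : Nat) (w : List String) (d : PySem.Dict String String) (b : String)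
    (h : d.get? b ≠ none) : (pdLoopA fuel w d).get? b ≠ none := by
  induction fuel generalizing w d with
  | zero => exact h
  | succ fuel ih =>
    match w with
    | [] => exact h
    | [x] => exact h
    | k :: e :: rest =>
      by_cases he : e = "="
      · subst he
        cases hidx : PySem.List.index? rest "=" with
        | none =>
          simp only [pdLoopA, hidx, if_neg (show ¬ ("=" : String) ≠ "=" from by simp)]
          exact get?_insert_ne_none _ _ _ _ h
        | some j =>
          simp only [pdLoopA, hidx, if_neg (show ¬ ("=" : String) ≠ "=" from by simp)]
          refine ih _ _ ?_
          by_cases hk2 : k = "epitch"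
          · rw [if_pos hk2]
            refine get?_insert_ne_none _ _ _ _ ?_
            by_cases hk1 : k = "eyaw"
            · rw [if_pos hk1]
              exact get?_insert_ne_none _ _ _ _ h
            · rw [if_neg hk1]
              exact h
          · rw [if_neg hk2]
            refine get?_insert_ne_none _ _ _ _ ?_
            by_cases hk1 : k = "eyaw"
            · rw [if_pos hk1]
              exact get?_insert_ne_none _ _ _ _ h
            · rw [if_neg hk1]
              exact h
      · simp only [pdLoopA, if_pos he]
        exact h

lemma pdLoopA_bad (fuel : Nat) (w : List String) (d : PySem.Dict String String)
    (h : pdKeyBad fuel w = true) :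
    (pdLoopA fuel w d).get? "eyaw" ≠ none ∨ (pdLoopA fuel w d).get? "epitch" ≠ none := by
  induction fuel generalizing w d with
  | zero => simp [pdKeyBad] at h
  | succ fuel ih =>
    match w with
    | [] => simp [pdKeyBad] at h
    | [x] => simp [pdKeyBad] at h
    | k :: e :: rest =>
      by_cases he : e = "="
      · subst he
        cases hidx : PySem.List.index? rest "=" with
        | none =>
          have h2 : k = "eyaw" ∨ k = "epitch" := by
            simp only [pdKeyBad, hidx] at h
            simpa using h
          simp only [pdLoopA, hidx, if_neg (show ¬ ("=" : String) ≠ "=" from by simp)]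
          rcases h2 with hk | hk
          · subst hk
            left
            rw [PySem.Dict.get?_insert_self]
            simp
          · subst hk
            right
            rw [PySem.Dict.get?_insert_self]
            simp
        | some j =>
          have h2 : k = "eyaw" ∨ pdKeyBad fuel (("=" :: rest).drop j) = true := by
            simp only [pdKeyBad, hidx] at h
            simpa using h
          simp only [pdLoopA, hidx, if_neg (show ¬ ("=" : String) ≠ "=" from by simp)]
          rcases h2 with hk | hrec
          · subst hk
            left
            refine pdLoopA_pres _ _ _ _ ?_
            rw [if_neg (by decide : ¬ ("eyaw" : String) = "epitch"),
              if_pos rfl, PySem.Dict.get?_insert_self]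
            simp
          · exact ih _ _ hrec
      · simp [pdKeyBad, he] at h

lemma pdLoopB_none (fuel : Nat) (words : List String) (i : Nat) (d : PySem.Dict String String)
    (b : String) (hb : b = "eyaw" ∨ b = "epitch") (h : d.get? b = none) :
    (pdLoopB fuel words i d).get? b = none := by
  induction fuel generalizing i d with
  | zero => exact h
  | succ fuel ih =>
    by_cases hc : words[i+1]? = some "="
    · simp only [pdLoopB, if_pos hc]
      have hkey : b ≠ (if words.getD i "" = "eyaw" then "yaw"
          else if words.getD i "" = "epitch" then "pitch" else words.getD i "") := by
        split_ifs with h1 h2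
        · rcases hb with rfl | rfl <;> decide
        · rcases hb with rfl | rfl <;> decide
        · rcases hb with rfl | rfl
          · exact fun hh => h1 hh.symm
          · exact fun hh => h2 hh.symm
      cases hidx : PySem.List.index? (words.drop (i + 2)) "=" with
      | some dj =>
        refine ih _ _ ?_
        rw [PySem.Dict.get?_insert_of_ne _ _ hkey]
        exact h
      | none =>
        rw [PySem.Dict.get?_insert_of_ne _ _ hkey]
        exact h
    · simp only [pdLoopB, if_neg hc]
      exact h

lemma pdKeyBad_complete (fuel : Nat) (v : List String) (hf : v.length ≤ fuel)
    (h2 : 2 ≤ v.length) (he : v.getD 1 "" = "=")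
    (hk : "eyaw" ∈ pdKeys v ∨ (pdKeys v).getLast? = some "epitch") :
    pdKeyBad fuel v = true := by
  induction fuel generalizing v with
  | zero =>
    exfalso
    omega
  | succ fuel ih =>
    match v, h2 with
    | k :: e :: rest, _ =>
      have he' : e = "=" := by simpa using he
      subst he'
      cases hidx : PySem.List.index? rest "=" with
      | none =>
        have hk2 : k = "eyaw" ∨ k = "epitch" := by
          rw [pdKeys_final k rest hidx] at hk
          simpa [eq_comm] using hk
        simp only [pdKeyBad, hidx]
        rcases hk2 with hk2 | hk2 <;> simp [hk2]
      | some j =>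
        obtain ⟨hjlt, hjv, -⟩ := PySem.List.getElem_of_index?_eq_some hidx
        rw [pdKeys_cons k rest j hidx] at hk
        simp only [pdKeyBad, hidx]
        by_cases hke : k = "eyaw"
        · simp [hke]
        · have hlen' : (("=" :: rest).drop j).length ≤ fuel := by
            simp only [List.length_drop, List.length_cons]
            simp only [List.length_cons] at hf
            omega
          have h2' : 2 ≤ (("=" :: rest).drop j).length := by
            simp only [List.length_drop, List.length_cons]
            omega
          have he'' : (("=" :: rest).drop j).getD 1 "" = "=" := by
            rw [List.getD_eq_getElem?_getD, List.getElem?_drop, List.getElem?_cons_succ,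
              List.getElem?_eq_getElem hjlt, hjv]
            rfl
          have hk' : "eyaw" ∈ pdKeys (("=" :: rest).drop j) ∨
              (pdKeys (("=" :: rest).drop j)).getLast? = some "epitch" := by
            obtain ⟨y, ys, hsh⟩ : ∃ y ys, pdKeys (("=" :: rest).drop j) = y :: ys := ⟨_, _, rfl⟩
            rw [hsh] at hk ⊢
            rcases hk with hm | hl
            · rcases List.mem_cons.mp hm with hm | hm
              · exact absurd hm.symm hke
              · exact Or.inl hm
            · rw [List.getLast?_cons_cons] at hl
              exact Or.inr hl
          simp [ih _ hlen' h2' he'' hk']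

-- ===== VERDICT (by name: the statement is the Claim_ definition above) =====
theorem parameter_dictionary_spec : Claim_unchanged_parameter_dictionary := by
  intro w _ hpre
  unfold Spec_parameter_dictionary
  intro hD
  unfold D_parameter_dictionary at hD
  unfold Pre_parameter_dictionary at hpre
  unfold parameter_dictionary parameter_dictionary_alt
  have hlen : (pdNorm w).length = w.length := by simp [pdNorm]
  have hb : pdKeyBad (pdNorm w).length (pdNorm w) = false := by
    rcases Bool.eq_false_or_eq_true (pdKeyBad (pdNorm w).length (pdNorm w)) with ht | hf
    · exfalso
      obtain ⟨h1, h2, h3⟩ := pdKeyBad_sound _ _ (by rwa [hlen, pdKeyBad_norm] at ht)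
      refine hD ⟨h1, h2, ?_⟩
      rw [pdKs_eq]
      rcases h3 with hm | hl | hl
      · exact Or.inl ((mem_cons_iff_dropLast_or_getLast _ _ _).mpr (Or.inl hm))
      · exact Or.inl ((mem_cons_iff_dropLast_or_getLast _ _ _).mpr (Or.inr hl))
      · exact Or.inr hl
    · exact hf
  have h := loop_eq (pdNorm w).length (pdNorm w) 0 PySem.Dict.empty
    (by rw [List.drop_zero]; exact hb)
    (by rw [List.drop_zero, hlen]; exact hpre)
  rw [List.drop_zero] at h
  rw [h]

theorem parameter_dictionary_changed : Claim_changed_parameter_dictionary := by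
  unfold Claim_changed_parameter_dictionary; decide

theorem parameter_dictionary_tight : Claim_exact_parameter_dictionary := by
  intro w _ _ hD heq
  obtain ⟨h2, he, hk⟩ := hD
  rw [pdKs_eq] at hk
  have hlen : (pdNorm w).length = w.length := by simp [pdNorm]
  have hbad : pdKeyBad (pdNorm w).length (pdNorm w) = true := by
    rw [hlen, pdKeyBad_norm]
    exact pdKeyBad_complete w.length w le_rfl h2 he hk
  have hd : pdLoopA (pdNorm w).length (pdNorm w) PySem.Dict.empty
      = pdLoopB (pdNorm w).length (pdNorm w) 0 PySem.Dict.empty := PySem.Dict.ext heq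
  rcases pdLoopA_bad (pdNorm w).length (pdNorm w) PySem.Dict.empty hbad with h | h
  · exact h (by rw [hd]; exact pdLoopB_none _ _ _ _ _ (Or.inl rfl) rfl)
  · exact h (by rw [hd]; exact pdLoopB_none _ _ _ _ _ (Or.inr rfl) rfl)
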